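-- pv_equiv track=rewrite | github.com/tompika/num_beadando | _nb/sol.py | matrixnorma
-- ===== SOURCE A (Python) =====
-- def matrixnorma(A):
--   mxi=0
--   for sor in A:
--     mxi=max(mxi,sum(abs(v) for v in sor))
--   mx1=0
--   for j in range(len(A)):
--     mx1=max(mx1,sum(abs(A[i][j]) for i in range(len(A))))
--   return mx1,mxi
-- ===== SOURCE B (Python) =====
-- def matrixnorma(A):
--   n = len(A)
--   colsums = [0] * n
--   maxrow = 0
--   for row in A:
--     maxrow = max(maxrow, sum(abs(v) for v in row))
--     colsums = [colsums[j] + abs(row[j]) for j in range(n)]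
--   res = 0
--   for c in colsums:
--     res = max(res, c)
--   return res, maxrow
-- ===== Notes on version B (the rewrite author's own statement) =====
-- stated objective: alternative
-- what changed: B makes a single pass over the rows, maintaining a column-sum accumulator list and the running max row sum, instead of A's second column-by-column scan with index-based lookups A[i][j].
import Mathlib
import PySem

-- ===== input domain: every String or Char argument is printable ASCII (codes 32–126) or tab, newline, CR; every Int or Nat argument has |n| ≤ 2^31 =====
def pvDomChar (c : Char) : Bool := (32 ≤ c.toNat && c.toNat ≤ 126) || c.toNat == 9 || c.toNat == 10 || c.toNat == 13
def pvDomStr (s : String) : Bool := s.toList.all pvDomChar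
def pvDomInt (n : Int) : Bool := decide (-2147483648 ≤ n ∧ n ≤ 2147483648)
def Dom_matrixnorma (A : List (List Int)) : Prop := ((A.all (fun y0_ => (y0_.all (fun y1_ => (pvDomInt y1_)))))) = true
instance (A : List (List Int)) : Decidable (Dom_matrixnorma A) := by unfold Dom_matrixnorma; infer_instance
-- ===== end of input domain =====

-- B computes the column sums in one row-wise pass with an accumulator instead of A's second transposed index scan.


-- ===== PORT A =====
def matrixnorma (A : List (List Int)) : Int × Int :=
  -- mxi = 0; for sor in A: mxi = max(mxi, sum(abs(v) for v in sor))
  let mxi := A.foldl (fun m sor => max m (sor.foldl (fun s v => s + |v|) 0)) 0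
  -- mx1 = 0; for j in range(len(A)): mx1 = max(mx1, sum(abs(A[i][j]) for i in range(len(A))))
  let n : Int := A.length
  let mx1 := (PySem.List.pyRange 0 n 1).foldl
      (fun m j => max m ((PySem.List.pyRange 0 n 1).foldl
        (fun s i => s + |PySem.List.pyGetD (PySem.List.pyGetD A i []) j 0|) 0)) 0
  (mx1, mxi)

-- ===== PORT B =====
def matrixnorma_alt (A : List (List Int)) : Int × Int :=
  let n : Int := A.length
  -- single pass over the rows, carrying (colsums, maxrow)
  let st := A.foldl (fun (st : List Int × Int) row =>
      ((PySem.List.pyRange 0 n 1).map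
         (fun j => PySem.List.pyGetD st.1 j 0 + |PySem.List.pyGetD row j 0|),
       max st.2 (row.foldl (fun s v => s + |v|) 0)))
    (List.replicate n.toNat 0, 0)
  -- res = 0; for c in colsums: res = max(res, c)
  (st.1.foldl max 0, st.2)

-- ===== PRECONDITION & SPEC =====
-- Pre_ excludes exactly the inputs where the Python raises IndexError: some row shorter than len(A)
def Pre_matrixnorma (A : List (List Int)) : Prop := ∀ row ∈ A, A.length ≤ row.length
instance (A : List (List Int)) : Decidable (Pre_matrixnorma A) := by unfold Pre_matrixnorma; infer_instance
def pvWitness_matrixnorma : List (List Int) := [[1, -2], [3, 4]]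

def Spec_matrixnorma (A : List (List Int)) (out : Int × Int) : Prop := out = matrixnorma_alt A
instance (A : List (List Int)) (out : Int × Int) : Decidable (Spec_matrixnorma A out) := by unfold Spec_matrixnorma; infer_instance

-- ===== CLAIM (what is proved, stated in full; the proofs are below) =====
def Claim_equal_matrixnorma : Prop := ∀ (A : List (List Int)), Dom_matrixnorma A → Pre_matrixnorma A → Spec_matrixnorma A (matrixnorma A)

-- ===== LEMMAS AND PROOFS =====

-- the per-column accumulator after folding rows L, starting from colsums (pyRange 0 n 1).map g
lemma colfold (L : List (List Int)) (n : Int) (g : Int → Int) (m : Int) :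
    (L.foldl (fun (st : List Int × Int) row =>
        ((PySem.List.pyRange 0 n 1).map
           (fun j => PySem.List.pyGetD st.1 j 0 + |PySem.List.pyGetD row j 0|),
         max st.2 (row.foldl (fun s v => s + |v|) 0)))
      ((PySem.List.pyRange 0 n 1).map g, m)).1
    = (PySem.List.pyRange 0 n 1).map
        (fun j => g j + (L.map (fun row => |PySem.List.pyGetD row j 0|)).sum) := by
  induction L generalizing g m with
  | nil => simp
  | cons row L ih =>
    simp only [List.foldl_cons]
    have hmap : (PySem.List.pyRange 0 n 1).map
        (fun j => PySem.List.pyGetD ((PySem.List.pyRange 0 n 1).map g) j 0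
                  + |PySem.List.pyGetD row j 0|)
        = (PySem.List.pyRange 0 n 1).map
            (fun j => (fun j => g j + |PySem.List.pyGetD row j 0|) j) := by
      apply List.map_congr_left
      intro j hj
      rw [PySem.List.mem_pyRange_one] at hj
      rw [PySem.List.pyGetD_map_pyRange_of_nonneg g n j 0 hj.1 hj.2]
    rw [hmap, ih]
    apply List.map_congr_left
    intro j _
    simp [add_assoc]

-- the second component of B's fold ignores the colsums accumulator
lemma colfold2 (L : List (List Int)) (n : Int) (cs : List Int) (m : Int) :
    (L.foldl (fun (st : List Int × Int) row =>
        ((PySem.List.pyRange 0 n 1).map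
           (fun j => PySem.List.pyGetD st.1 j 0 + |PySem.List.pyGetD row j 0|),
         max st.2 (row.foldl (fun s v => s + |v|) 0)))
      (cs, m)).2
    = L.foldl (fun m row => max m (row.foldl (fun s v => s + |v|) 0)) m := by
  induction L generalizing cs m with
  | nil => rfl
  | cons row L ih => simp only [List.foldl_cons]; rw [ih]

-- A's inner column loop equals the column sum over the rows
lemma colA_eq (A : List (List Int)) (j : Int) :
    (PySem.List.pyRange 0 (A.length : Int) 1).foldl
      (fun s i => s + |PySem.List.pyGetD (PySem.List.pyGetD A i []) j 0|) 0
    = (A.map (fun row => |PySem.List.pyGetD row j 0|)).sum := by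
  rw [PySem.List.foldl_pyRange_zero_pyGetD' A ([] : List Int)
      (fun s row => s + |PySem.List.pyGetD row j 0|) 0]
  rw [PySem.List.foldl_add]
  simp

-- ===== VERDICT (by name: the statement is the Claim_ definition above) =====
theorem matrixnorma_spec : Claim_equal_matrixnorma := by
  intro A _ _
  unfold Spec_matrixnorma matrixnorma matrixnorma_alt
  have hrep : (List.replicate ((A.length : Int)).toNat (0 : Int))
      = (PySem.List.pyRange 0 (A.length : Int) 1).map (fun _ => (0 : Int)) := by
    rw [List.map_const']
    congr 1
    rw [PySem.List.length_pyRange_one]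
    simp
  simp only [hrep]
  rw [colfold A (A.length : Int) (fun _ => 0) 0, colfold2]
  refine Prod.ext ?_ rfl
  simp only []
  have hmap2 : (PySem.List.pyRange 0 (A.length : Int) 1).map
      (fun j => 0 + (A.map (fun row => |PySem.List.pyGetD row j 0|)).sum)
      = (PySem.List.pyRange 0 (A.length : Int) 1).map
          (fun j => (PySem.List.pyRange 0 (A.length : Int) 1).foldl
            (fun s i => s + |PySem.List.pyGetD (PySem.List.pyGetD A i []) j 0|) 0) := by
    apply List.map_congr_left
    intro j _
    rw [colA_eq]
    simp
  rw [hmap2, List.foldl_map]
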